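-- pv_equiv track=rewrite | github.com/longhaiSK/longhaiSK.github.io | software/genabbrev/generate_abbrev_letters.py | normalize_dollar_spacing
-- ===== SOURCE A (Python) =====
-- def normalize_dollar_spacing(text):
--     """
--     Removes whitespace immediately following an opening inline math '$' AND
--     whitespace immediately preceding a closing inline math '$'.
--     Handles escaped '\$'.
--
--     Args:
--         text (str): The input string potentially containing LaTeX.
--
--     Returns:
--         str: The processed string.
--     """
--     processed_chars = []
--     in_math_mode = False
--     i = 0
--     n = len(text)
--
--     while i < n:
--         char = text[i]
--
--         # Check for escaped dollar sign or backslash first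
--         if char == '\\' and i + 1 < n:
--             # Keep backslash and the next character (e.g., '\$' or '\\')
--             processed_chars.append(char)
--             processed_chars.append(text[i+1])
--             i += 2 # Skip both characters
--             continue
--
--         # Check for unescaped dollar sign
--         if char == '$':
--             if not in_math_mode:
--                 # --- This is an OPENING dollar sign ---
--                 processed_chars.append(char) # Keep the opening dollar
--                 in_math_mode = True
--                 # Check if the next characters are whitespace and skip them
--                 j = i + 1
--                 while j < n and text[j].isspace():
--                     j += 1
--                 # Advance 'i' past the dollar and the skipped whitespace
--                 i = j
--                 continue # Continue to next iteration
--             else: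
--                 # --- This is a CLOSING dollar sign ---
--                 in_math_mode = False
--                 # Remove any trailing whitespace added just before this closing '$'
--                 while processed_chars and processed_chars[-1].isspace():
--                     processed_chars.pop()
--                 processed_chars.append(char) # Append the closing dollar
--                 # Advance 'i' past the dollar for the next iteration
--                 i += 1
--                 continue # Continue to next iteration
--         else:
--             # Any other character
--             processed_chars.append(char)
--             i += 1 # Advance 'i' past the character
--
--     return "".join(processed_chars)
-- ===== SOURCE B (Python) =====
-- def normalize_dollar_spacing(text):
--     """Two-pass version: tokenize at unescaped '$' into alternating
--     non-math / math segments, then rebuild, stripping whitespace at the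
--     edges of each closed math segment (leading only for an unterminated one)."""
--     segs = []
--     cur = []
--     i = 0
--     n = len(text)
--     while i < n:
--         c = text[i]
--         if c == '\\' and i + 1 < n:
--             cur.append(c)
--             cur.append(text[i + 1])
--             i += 2
--         elif c == '$':
--             segs.append(''.join(cur))
--             cur = []
--             i += 1
--         else:
--             cur.append(c)
--             i += 1
--     segs.append(''.join(cur))
--
--     out = []
--     last = len(segs) - 1
--     for k, s in enumerate(segs):
--         if k % 2 == 0:
--             out.append(s)                      # outside math: verbatim
--         elif k == last:
--             out.append('$' + s.lstrip())       # unterminated math tail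
--         else:
--             out.append('$' + s.strip() + '$')  # closed math segment
--     return ''.join(out)
-- ===== Notes on version B (the rewrite author's own statement) =====
-- stated objective: alternative
-- what changed: A's single stateful scan (math-mode flag, in-place whitespace skipping after an opening dollar and popping before a closing one) is replaced by two passes: tokenize the text at unescaped dollar signs into alternating non-math/math segments, then rebuild, emitting each closed math segment with both edges stripped and an unterminated tail with only its leading whitespace stripped.
import Mathlib
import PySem

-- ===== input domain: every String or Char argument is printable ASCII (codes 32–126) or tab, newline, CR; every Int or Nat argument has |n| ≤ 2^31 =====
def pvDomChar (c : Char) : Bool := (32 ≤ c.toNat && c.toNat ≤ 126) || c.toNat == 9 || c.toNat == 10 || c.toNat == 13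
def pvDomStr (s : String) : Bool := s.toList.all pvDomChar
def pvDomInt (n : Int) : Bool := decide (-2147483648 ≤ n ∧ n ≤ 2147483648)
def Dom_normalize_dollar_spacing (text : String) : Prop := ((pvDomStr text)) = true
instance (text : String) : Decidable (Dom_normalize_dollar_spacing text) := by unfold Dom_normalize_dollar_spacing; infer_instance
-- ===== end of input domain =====

-- B replaces A's single stateful scan (math-mode flag, skipping whitespace after an
-- opening dollar, popping it before a closing one) by a tokenize-then-rebuild pair of
-- passes: split at unescaped dollar signs into alternating segments, then re-emit,
-- stripping the edges of each closed math segment.  Objective: alternative decomposition.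

-- ===== PORT A =====
-- 'while j < n and text[j].isspace(): j += 1' on the remaining characters
def pvSkipWS : List Char → List Char
  | [] => []
  | c :: r => if PySem.Chars.isspace c then pvSkipWS r else c :: r

-- 'while processed_chars and processed_chars[-1].isspace(): processed_chars.pop()';
-- the accumulator is kept reversed, so popping from the end is dropping the head
def pvPopWS : List Char → List Char
  | [] => []
  | c :: r => if PySem.Chars.isspace c then pvPopWS r else c :: r

-- needed by pvGoA's termination proof (cited in decreasing_by)
theorem pvSkipWS_len (l : List Char) : (pvSkipWS l).length ≤ l.length := by
  induction l with
  | nil => exact le_rfl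
  | cons h t ih =>
    simp only [pvSkipWS]
    split
    · exact le_trans ih (by simp)
    · exact le_rfl

-- the main 'while i < n' loop; the list argument is the remaining text text[i:],
-- processed_chars is kept in reverse order (append = cons)
def pvGoA : List Char → Bool → List Char → List Char
  | [], _, acc => acc
  | c :: rest, math, acc =>
    if c = '\\' then
      match rest with
      | d :: rest' => pvGoA rest' math (d :: c :: acc)      -- keep '\', next char, i += 2
      | [] => pvGoA [] math (c :: acc)                      -- i+1 = n: falls through ('\' ≠ '$')
    else if c = '$' then
      if math = false then
        pvGoA (pvSkipWS rest) true (c :: acc)               -- opening '$': skip whitespace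
      else
        pvGoA rest false (c :: pvPopWS acc)                 -- closing '$': pop trailing whitespace
    else
      pvGoA rest math (c :: acc)
termination_by cs => cs.length
decreasing_by
  all_goals simp only [List.length_cons]
  all_goals first
    | omega
    | exact Nat.lt_succ_of_le (pvSkipWS_len rest)

def normalize_dollar_spacing (text : String) : String :=
  String.mk (pvGoA text.toList false []).reverse

-- ===== PORT B =====
-- first pass: split the text at unescaped '$' ('\x' consumes two characters);
-- returns the segments in order, alternating non-math / math, never empty
def pvTok : List Char → List (List Char)
  | [] => [[]]
  | c :: rest =>
    if c = '\\' then
      match rest with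
      | d :: rest' =>
        match pvTok rest' with
        | s :: ss => (c :: d :: s) :: ss
        | [] => [[c, d]]                                    -- unreachable: pvTok ≠ []
      | [] => [[c]]
    else if c = '$' then
      [] :: pvTok rest
    else
      match pvTok rest with
      | s :: ss => (c :: s) :: ss
      | [] => [[c]]                                         -- unreachable
termination_by cs => cs.length
decreasing_by all_goals simp

-- second pass: re-emit; the Bool says whether the segment at hand is math
def pvRender : Bool → List (List Char) → List Char
  | _, [] => []
  | math, [s] => if math then '$' :: PySem.Chars.lstrip s else s
  | math, s :: ss =>
    (if math then '$' :: (PySem.Chars.strip s ++ ['$']) else s) ++ pvRender (!math) ss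

def normalize_dollar_spacing_alt (text : String) : String :=
  String.mk (pvRender false (pvTok text.toList))

-- ===== PRECONDITION & SPEC =====
def Spec_normalize_dollar_spacing (text : String) (out : String) : Prop := out = normalize_dollar_spacing_alt text
instance (text : String) (out : String) : Decidable (Spec_normalize_dollar_spacing text out) := by unfold Spec_normalize_dollar_spacing; infer_instance

-- ===== CLAIM (what is proved, stated in full; the proofs are below) =====
def Claim_equal_normalize_dollar_spacing : Prop := ∀ (text : String), Dom_normalize_dollar_spacing text → Spec_normalize_dollar_spacing text (normalize_dollar_spacing text)

-- ===== LEMMAS AND PROOFS =====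

-- equation lemmas for the two well-founded recursions
theorem pvGoA_nil (math : Bool) (acc : List Char) : pvGoA [] math acc = acc := by
  rw [pvGoA.eq_def]

theorem pvGoA_esc2 (d : Char) (r : List Char) (math : Bool) (acc : List Char) :
    pvGoA ('\\' :: d :: r) math acc = pvGoA r math (d :: '\\' :: acc) := by
  rw [pvGoA.eq_def]; simp

theorem pvGoA_esc1 (math : Bool) (acc : List Char) :
    pvGoA ['\\'] math acc = '\\' :: acc := by
  rw [pvGoA.eq_def]; simp [pvGoA_nil]

theorem pvGoA_dollar_false (r : List Char) (acc : List Char) :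
    pvGoA ('$' :: r) false acc = pvGoA (pvSkipWS r) true ('$' :: acc) := by
  rw [pvGoA.eq_def]; simp

theorem pvGoA_dollar_true (r : List Char) (acc : List Char) :
    pvGoA ('$' :: r) true acc = pvGoA r false ('$' :: pvPopWS acc) := by
  rw [pvGoA.eq_def]; simp

theorem pvGoA_other {c : Char} (r : List Char) (math : Bool) (acc : List Char)
    (h1 : ¬ c = '\\') (h2 : ¬ c = '$') :
    pvGoA (c :: r) math acc = pvGoA r math (c :: acc) := by
  rw [pvGoA.eq_def]; simp [h1, h2]

theorem pvTok_nil : pvTok [] = [[]] := by rw [pvTok.eq_def]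

theorem pvTok_esc2 (d : Char) (r : List Char) :
    pvTok ('\\' :: d :: r) =
      match pvTok r with
      | s :: ss => ('\\' :: d :: s) :: ss
      | [] => [['\\', d]] := by
  rw [pvTok.eq_def]; simp

theorem pvTok_esc1 : pvTok ['\\'] = [['\\']] := by rw [pvTok.eq_def]; simp

theorem pvTok_dollar (r : List Char) : pvTok ('$' :: r) = [] :: pvTok r := by
  rw [pvTok.eq_def]; simp

theorem pvTok_other {c : Char} (r : List Char) (h1 : ¬ c = '\\') (h2 : ¬ c = '$') :
    pvTok (c :: r) =
      match pvTok r with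
      | s :: ss => (c :: s) :: ss
      | [] => [[c]] := by
  rw [pvTok.eq_def]; simp [h1, h2]

theorem pvSkipWS_eq_dropWhile (l : List Char) :
    pvSkipWS l = l.dropWhile PySem.Chars.isspace := by
  induction l with
  | nil => rfl
  | cons c r ih => simp only [pvSkipWS, List.dropWhile_cons]; split <;> simp_all

theorem pvPopWS_eq_dropWhile (l : List Char) :
    pvPopWS l = l.dropWhile PySem.Chars.isspace := by
  induction l with
  | nil => rfl
  | cons c r ih => simp only [pvPopWS, List.dropWhile_cons]; split <;> simp_all

theorem pvTok_ne_nil (cs : List Char) : pvTok cs ≠ [] := by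
  rcases cs with _ | ⟨c, rest⟩
  · simp [pvTok_nil]
  · by_cases hb : c = '\\'
    · subst hb
      rcases rest with _ | ⟨d, r'⟩
      · simp [pvTok_esc1]
      · rw [pvTok_esc2]
        rcases pvTok r' with _ | ⟨s, ss⟩ <;> simp
    · by_cases hd : c = '$'
      · subst hd; simp [pvTok_dollar]
      · rw [pvTok_other rest hb hd]
        rcases pvTok rest with _ | ⟨s, ss⟩ <;> simp

theorem dropWhile_append_cons {p : Char → Bool} (l t : List Char) {c : Char}
    (hc : p c = false) :
    (l ++ c :: t).dropWhile p = l.dropWhile p ++ c :: t := by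
  induction l with
  | nil => simp [hc]
  | cons a r ih => simp only [List.cons_append, List.dropWhile_cons]; split <;> simp_all

-- a tail whose head is not whitespace passes through dropWhile untouched
def pvGuard (acc : List Char) : Prop :=
  acc = [] ∨ ∃ h t, acc = h :: t ∧ PySem.Chars.isspace h = false

-- the math-mode continuation of A, described through B's tokens
def pvMathSpec (cs pre acc : List Char) : List Char :=
  match pvTok cs with
  | [] => pre ++ acc
  | [s] => s.reverse ++ (pre ++ acc)
  | s :: ss => (pvRender false ss).reverse ++ '$' ::
      ((s.reverse ++ pre).dropWhile PySem.Chars.isspace ++ acc)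

theorem dropWhile_append_guard {l acc : List Char} (hg : pvGuard acc) :
    (l ++ acc).dropWhile PySem.Chars.isspace = l.dropWhile PySem.Chars.isspace ++ acc := by
  rcases hg with rfl | ⟨h, t, rfl, hh⟩
  · simp
  · exact dropWhile_append_cons l t hh

theorem pvRender_false_cons (c : Char) (s : List Char) (ss : List (List Char)) :
    pvRender false ((c :: s) :: ss) = c :: pvRender false (s :: ss) := by
  cases ss <;> simp [pvRender]

-- splitting commutes with stripping leading whitespace
theorem pvTok_dropWhile (cs : List Char) :
    pvTok (cs.dropWhile PySem.Chars.isspace) =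
      match pvTok cs with
      | s :: ss => s.dropWhile PySem.Chars.isspace :: ss
      | [] => [] := by
  induction cs with
  | nil => simp [pvTok_nil]
  | cons c r ih =>
    by_cases hs : PySem.Chars.isspace c = true
    · have hb : ¬ c = '\\' := by rintro rfl; revert hs; decide
      have hd : ¬ c = '$' := by rintro rfl; revert hs; decide
      rw [List.dropWhile_cons_of_pos hs, ih]
      rcases h : pvTok r with _ | ⟨s, ss⟩
      · exact absurd h (pvTok_ne_nil r)
      · rw [pvTok_other r hb hd, h]
        simp [List.dropWhile_cons_of_pos hs]
    · rw [List.dropWhile_cons_of_neg hs]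
      by_cases hb : c = '\\'
      · subst hb
        rcases r with _ | ⟨d, r'⟩
        · simp [pvTok_esc1, List.dropWhile_cons_of_neg hs]
        · rcases h' : pvTok r' with _ | ⟨s', ss'⟩
          · exact absurd h' (pvTok_ne_nil _)
          · rw [pvTok_esc2 d r', h']
            simp [List.dropWhile_cons_of_neg hs]
      · by_cases hd : c = '$'
        · subst hd
          rw [pvTok_dollar r]
          simp
        · rcases h' : pvTok r with _ | ⟨s', ss'⟩
          · exact absurd h' (pvTok_ne_nil _)
          · rw [pvTok_other r hb hd, h']
            simp [List.dropWhile_cons_of_neg hs]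

-- the main correspondence, both modes at once, by strong induction on the length
theorem pvGoA_main : ∀ (n : Nat) (cs : List Char), cs.length ≤ n →
    (∀ acc, pvGoA cs false acc = (pvRender false (pvTok cs)).reverse ++ acc) ∧
    (∀ pre acc, pvGuard acc → pvGoA cs true (pre ++ acc) = pvMathSpec cs pre acc) := by
  intro n
  induction n with
  | zero =>
    intro cs hcs
    have h0 : cs = [] := List.eq_nil_of_length_eq_zero (Nat.le_zero.mp hcs)
    subst h0
    constructor
    · intro acc; simp [pvGoA_nil, pvTok_nil, pvRender]
    · intro pre acc _; simp [pvGoA_nil, pvMathSpec, pvTok_nil]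
  | succ n ih =>
    intro cs hcs
    rcases cs with _ | ⟨c, rest⟩
    · constructor
      · intro acc; simp [pvGoA_nil, pvTok_nil, pvRender]
      · intro pre acc _; simp [pvGoA_nil, pvMathSpec, pvTok_nil]
    simp only [List.length_cons, Nat.succ_le_succ_iff] at hcs
    constructor
    · -- non-math mode
      intro acc
      by_cases hb : c = '\\'
      · subst hb
        rcases rest with _ | ⟨d, rest'⟩
        · simp [pvGoA_esc1, pvTok_esc1, pvRender]
        · rcases htok : pvTok rest' with _ | ⟨s, ss⟩
          · exact absurd htok (pvTok_ne_nil _)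
          · have hN := (ih rest' (by simp at hcs; omega)).1 (d :: '\\' :: acc)
            rw [htok] at hN
            rw [pvGoA_esc2, hN, pvTok_esc2, htok]
            rw [pvRender_false_cons, pvRender_false_cons]
            simp
      · by_cases hd : c = '$'
        · subst hd
          rw [pvGoA_dollar_false]
          have hg : pvGuard ('$' :: acc) := Or.inr ⟨'$', acc, rfl, by decide⟩
          have hM := (ih (pvSkipWS rest)
            (le_trans (pvSkipWS_len rest) hcs)).2 [] ('$' :: acc) hg
          rw [List.nil_append] at hM
          rw [hM]
          unfold pvMathSpec
          rw [pvSkipWS_eq_dropWhile, pvTok_dropWhile, pvTok_dollar]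
          rcases htok : pvTok rest with _ | ⟨s, ss⟩
          · exact absurd htok (pvTok_ne_nil _)
          · rcases ss with _ | ⟨s2, ss2⟩
            · simp [pvRender, PySem.Chars.lstrip]
            · have hstrip : (PySem.Chars.strip s).reverse
                  = ((s.dropWhile PySem.Chars.isspace).reverse).dropWhile PySem.Chars.isspace := by
                show (((s.dropWhile PySem.Chars.isspace).reverse.dropWhile
                    PySem.Chars.isspace).reverse).reverse = _
                rw [List.reverse_reverse]
              simp [pvRender, hstrip]
        · rcases htok : pvTok rest with _ | ⟨s, ss⟩
          · exact absurd htok (pvTok_ne_nil _)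
          · have hN := (ih rest hcs).1 (c :: acc)
            rw [htok] at hN
            rw [pvGoA_other rest false acc hb hd, hN, pvTok_other rest hb hd, htok]
            rw [pvRender_false_cons]
            simp
    · -- math mode
      intro pre acc hg
      by_cases hb : c = '\\'
      · subst hb
        rcases rest with _ | ⟨d, rest'⟩
        · simp [pvGoA_esc1, pvMathSpec, pvTok_esc1]
        · rcases htok : pvTok rest' with _ | ⟨s, ss⟩
          · exact absurd htok (pvTok_ne_nil _)
          · have hM := (ih rest' (by simp at hcs; omega)).2 (d :: '\\' :: pre) acc hg
            rw [pvGoA_esc2]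
            rw [show d :: '\\' :: (pre ++ acc) = (d :: '\\' :: pre) ++ acc from rfl, hM]
            unfold pvMathSpec
            rw [htok, pvTok_esc2, htok]
            rcases ss with _ | ⟨s2, ss2⟩ <;> simp
      · by_cases hd : c = '$'
        · subst hd
          rw [pvGoA_dollar_true]
          rcases htok : pvTok rest with _ | ⟨s, ss⟩
          · exact absurd htok (pvTok_ne_nil _)
          · have hN := (ih rest hcs).1 ('$' :: (pre.dropWhile PySem.Chars.isspace ++ acc))
            rw [htok] at hN
            rw [pvPopWS_eq_dropWhile, dropWhile_append_guard hg, hN]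
            unfold pvMathSpec
            rw [pvTok_dollar, htok]
            simp
        · rcases htok : pvTok rest with _ | ⟨s, ss⟩
          · exact absurd htok (pvTok_ne_nil _)
          · have hM := (ih rest hcs).2 (c :: pre) acc hg
            rw [pvGoA_other rest true (pre ++ acc) hb hd]
            rw [show c :: (pre ++ acc) = (c :: pre) ++ acc from rfl, hM]
            unfold pvMathSpec
            rw [htok, pvTok_other rest hb hd, htok]
            rcases ss with _ | ⟨s2, ss2⟩ <;> simp

theorem goA_eq (cs : List Char) :
    (pvGoA cs false []).reverse = pvRender false (pvTok cs) := by
  rw [(pvGoA_main cs.length cs le_rfl).1 []]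
  simp

-- ===== VERDICT (by name: the statement is the Claim_ definition above) =====
theorem normalize_dollar_spacing_spec : Claim_equal_normalize_dollar_spacing := by
  intro text _
  unfold Spec_normalize_dollar_spacing normalize_dollar_spacing normalize_dollar_spacing_alt
  rw [goA_eq]
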